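-- pv_equiv track=rewrite | github.com/AdithyaRavik/CSC175-Projects | lab9.py | countTripple
-- ===== SOURCE A (Python) =====
-- def countTripple (string2):
--     c = string2
--     length2 = len(c)
--
--     ans = 0
--     for i in range (length2-2):
--         if c[i] == c[i+1] == c[i+2]:
--             ans = ans + 1
--
--     return ans
-- ===== SOURCE B (Python) =====
-- def countTripple(string2):
--     # Collapse into maximal runs; a run of length L contributes max(L-2, 0) triples.
--     ans = 0
--     run = 0
--     prev = None
--     for ch in string2:
--         if prev is not None and ch == prev:
--             run += 1
--         else:
--             ans += max(run - 2, 0)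
--             run = 1
--             prev = ch
--     ans += max(run - 2, 0)
--     return ans
-- ===== Notes on version B (the rewrite author's own statement) =====
-- stated objective: alternative
-- what changed: Replaces the indexed window scan (comparing s[i],s[i+1],s[i+2] for every i) by a run-length pass that collapses the string into maximal runs of equal characters and sums max(L-2,0) per run.
import Mathlib
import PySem

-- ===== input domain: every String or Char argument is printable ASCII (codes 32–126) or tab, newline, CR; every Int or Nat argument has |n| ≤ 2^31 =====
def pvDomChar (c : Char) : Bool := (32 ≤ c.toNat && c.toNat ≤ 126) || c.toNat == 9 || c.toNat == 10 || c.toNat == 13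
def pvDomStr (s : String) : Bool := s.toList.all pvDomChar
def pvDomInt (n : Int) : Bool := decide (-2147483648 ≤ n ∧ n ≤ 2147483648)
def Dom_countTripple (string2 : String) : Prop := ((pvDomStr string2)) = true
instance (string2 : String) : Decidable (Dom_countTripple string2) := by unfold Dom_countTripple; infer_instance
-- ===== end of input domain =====

-- B replaces A's indexed three-way window scan by a run-length pass summing max(L-2,0) per maximal run (alternative decomposition, same cost).

-- ===== PORT A =====
def countTripple (string2 : String) : Int :=
  let c := string2
  let length2 : Int := PySem.Str.len c
  (PySem.List.pyRange 0 (length2 - 2) 1).foldl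
    (fun ans i =>
      if PySem.Str.pyGet? c i = PySem.Str.pyGet? c (i + 1) ∧
         PySem.Str.pyGet? c (i + 1) = PySem.Str.pyGet? c (i + 2)
      then ans + 1 else ans) 0

-- ===== PORT B =====
def countTripple_alt (string2 : String) : Int :=
  let r := string2.toList.foldl
    (fun (st : Int × Int × Option Char) ch =>
      if some ch = st.2.2 then (st.1, st.2.1 + 1, st.2.2)
      else (st.1 + max (st.2.1 - 2) 0, 1, some ch))
    (0, 0, none)
  r.1 + max (r.2.1 - 2) 0

-- ===== PRECONDITION & SPEC =====
def Spec_countTripple (string2 : String) (out : Int) : Prop := out = countTripple_alt string2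
instance (string2 : String) (out : Int) : Decidable (Spec_countTripple string2 out) := by unfold Spec_countTripple; infer_instance

-- ===== CLAIM (what is proved, stated in full; the proofs are below) =====
def Claim_equal_countTripple : Prop := ∀ (string2 : String), Dom_countTripple string2 → Spec_countTripple string2 (countTripple string2)

-- ===== LEMMAS AND PROOFS =====

/-- Reference count of equal consecutive triples. -/
def pvT : List Char → Int
  | a :: b :: c :: t => (if a = b ∧ b = c then 1 else 0) + pvT (b :: c :: t)
  | _ => 0

/-- Run-length remainder: triples still to be counted given a pending run. -/
def pvR : Int → Option Char → List Char → Int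
  | run, _, [] => max (run - 2) 0
  | run, prev, c :: t =>
      if some c = prev then pvR (run + 1) prev t
      else max (run - 2) 0 + pvR 1 (some c) t

theorem pvT_replicate (x : Char) : ∀ n : Nat, pvT (List.replicate n x) = max ((n : Int) - 2) 0 := by
  intro n
  induction n with
  | zero => simp [pvT]
  | succ n ih =>
    match n, ih with
    | 0, _ => simp [pvT]
    | 1, _ => simp [pvT, List.replicate]
    | m + 2, ih =>
      have h : List.replicate (m + 3) x = x :: x :: x :: List.replicate m x := by
        simp [List.replicate_succ]
      have h2 : (x :: x :: List.replicate m x) = List.replicate (m + 2) x := by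
        simp [List.replicate_succ]
      rw [h, pvT, h2, ih, if_pos ⟨rfl, rfl⟩]
      push_cast; omega

theorem pvT_repl_ne (x c : Char) (hne : c ≠ x) :
    ∀ (r : Nat) (t : List Char),
      pvT (List.replicate (r + 1) x ++ c :: t) = max ((r : Int) - 1) 0 + pvT (c :: t) := by
  intro r
  induction r with
  | zero =>
    intro t
    cases t with
    | nil => simp [pvT]
    | cons d t' =>
      simp only [List.replicate_succ, List.replicate_zero, List.nil_append, List.cons_append, pvT]
      rw [if_neg (by rintro ⟨h1, _⟩; exact hne h1.symm)]
      simp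
  | succ r ih =>
    intro t
    match r, ih with
    | 0, _ =>
      have hxc : ¬ (x = x ∧ x = c) := by rintro ⟨_, h2⟩; exact hne h2.symm
      cases t with
      | nil =>
        simp only [List.replicate_succ, List.replicate_zero, List.nil_append, List.cons_append, pvT]
        simp [Ne.symm hne]
      | cons d t' =>
        simp only [List.replicate_succ, List.replicate_zero, List.nil_append, List.cons_append, pvT]
        simp [Ne.symm hne]
    | m + 1, ih =>
      have h : List.replicate (m + 3) x ++ c :: t = x :: x :: x :: (List.replicate m x ++ c :: t) := by
        simp [List.replicate_succ]
      have h2 : x :: x :: (List.replicate m x ++ c :: t) = List.replicate (m + 2) x ++ c :: t := by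
        simp [List.replicate_succ]
      rw [h, pvT, h2, ih t, if_pos ⟨rfl, rfl⟩]
      push_cast; omega

theorem pvR_eq_pvT :
    ∀ (l : List Char) (x : Char) (r : Nat),
      pvR ((r : Int) + 1) (some x) l = pvT (List.replicate (r + 1) x ++ l) := by
  intro l
  induction l with
  | nil =>
    intro x r
    simp only [pvR, List.append_nil, pvT_replicate]
    omega
  | cons c t ih =>
    intro x r
    by_cases hcx : c = x
    · subst hcx
      have h2 : List.replicate (r + 2) c ++ t = List.replicate (r + 1) c ++ c :: t := by
        simp [List.replicate_succ']
      have harith : ((r : Int) + 1) + 1 = ((r + 1 : Nat) : Int) + 1 := by push_cast; ring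
      rw [pvR, if_pos rfl, harith, ih c (r + 1), h2]
    · rw [pvR, if_neg (by simp [hcx])]
      have hb := ih c 0
      simp only [Nat.cast_zero, Int.zero_add] at hb
      norm_num at hb
      rw [hb, pvT_repl_ne x c hcx r t]
      omega

theorem pvR_zero_none : ∀ l : List Char, pvR 0 none l = pvT l := by
  intro l
  cases l with
  | nil => simp [pvR, pvT]
  | cons c t =>
    rw [pvR, if_neg (by simp)]
    have h := pvR_eq_pvT t c 0
    simp only [Nat.cast_zero, Int.zero_add] at h
    norm_num at h
    rw [h]
    simp

theorem pvB_fold (l : List Char) : ∀ (ans run : Int) (prev : Option Char),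
    (let r := l.foldl
        (fun (st : Int × Int × Option Char) ch =>
          if some ch = st.2.2 then (st.1, st.2.1 + 1, st.2.2)
          else (st.1 + max (st.2.1 - 2) 0, 1, some ch))
        (ans, run, prev)
     r.1 + max (r.2.1 - 2) 0) = ans + pvR run prev l := by
  induction l with
  | nil => intro ans run prev; simp [pvR]
  | cons c t ih =>
    intro ans run prev
    simp only [List.foldl_cons]
    by_cases h : some c = prev
    · rw [pvR, if_pos h]
      simpa [h] using ih ans (run + 1) prev
    · rw [pvR, if_neg h]
      have := ih (ans + max (run - 2) 0) 1 (some c)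
      simp only [if_neg h] at *
      rw [this]; ring

theorem countTripple_alt_eq_pvT (s : String) : countTripple_alt s = pvT s.toList := by
  unfold countTripple_alt
  rw [pvB_fold s.toList 0 0 none, pvR_zero_none]
  ring

theorem pvA_fold (l : List Char) : ∀ (a : Int),
    (List.range (l.length - 2)).foldl
      (fun ans k => if l[k]? = l[k + 1]? ∧ l[k + 1]? = l[k + 2]? then ans + 1 else ans) a
      = a + pvT l := by
  match l with
  | [] => intro a; simp [pvT]
  | [x] => intro a; simp [pvT]
  | [x, y] => intro a; simp [pvT]
  | x :: y :: z :: t =>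
    intro a
    have hlen : (x :: y :: z :: t).length - 2 = t.length + 1 := by simp
    rw [hlen, List.range_succ_eq_map, List.foldl_cons, List.foldl_map]
    have hcond : ((x :: y :: z :: t)[0]? = (x :: y :: z :: t)[1]? ∧
        (x :: y :: z :: t)[1]? = (x :: y :: z :: t)[2]?) ↔ (x = y ∧ y = z) := by simp
    have htail : ∀ (a' : Int),
        (List.range t.length).foldl
          (fun ans k => if (x :: y :: z :: t)[k + 1]? = (x :: y :: z :: t)[k + 1 + 1]? ∧
              (x :: y :: z :: t)[k + 1 + 1]? = (x :: y :: z :: t)[k + 1 + 2]? then ans + 1 else ans) a'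
          = a' + pvT (y :: z :: t) := by
      intro a'
      have hl2 : (y :: z :: t).length - 2 = t.length := by simp
      have := pvA_fold (y :: z :: t) a'
      rw [hl2] at this
      rw [← this]
      apply PySem.List.foldl_congr_mem
      intro acc k _
      simp [List.getElem?_cons_succ]
    rw [htail]
    rw [pvT]
    by_cases h : x = y ∧ y = z
    · rw [if_pos (hcond.mpr h), if_pos h]; ring
    · rw [if_neg (fun hc => h (hcond.mp hc)), if_neg h]; ring

theorem countTripple_eq_pvT (s : String) : countTripple s = pvT s.toList := by
  unfold countTripple
  simp only []
  rw [PySem.List.pyRange_one]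
  have hn : ((PySem.Str.len s : Int) - 2 - 0).toNat = s.toList.length - 2 := by
    simp [PySem.Str.len_eq]; omega
  rw [hn, List.foldl_map]
  rw [show pvT s.toList = 0 + pvT s.toList by ring, ← pvA_fold s.toList 0]
  apply PySem.List.foldl_congr_mem
  intro acc k _
  have e1 : (0 : Int) + (k : Int) = ((k : Nat) : Int) := by ring
  have e2 : (k : Int) + 1 = ((k + 1 : Nat) : Int) := by push_cast; ring
  have e3 : (k : Int) + 2 = ((k + 2 : Nat) : Int) := by push_cast; ring
  rw [e1, e2, e3]
  simp only [PySem.Str.pyGet?_natCast]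

-- ===== VERDICT (by name: the statement is the Claim_ definition above) =====
theorem countTripple_spec : Claim_equal_countTripple := by
  intro s _
  unfold Spec_countTripple
  rw [countTripple_eq_pvT, countTripple_alt_eq_pvT]
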